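-- pv_equiv track=rewrite | github.com/brusnyak/DXSB_lingonberry | src/planner/context_enrichment.py | _find_exact_symbol
-- ===== SOURCE A (Python) =====
-- from typing import Dict, List, Optional
--
-- def _find_exact_symbol(search_payload: Dict, asset: str) -> Optional[Dict]:
--     coins = search_payload.get("coins") or []
--     asset_upper = asset.upper()
--     for coin in coins:
--         if str(coin.get("symbol") or "").upper() == asset_upper:
--             return coin
--     if len(asset_upper) >= 3:
--         for coin in coins:
--             if str(coin.get("name") or "").upper() == asset_upper:
--                 return coin
--     return None
-- ===== SOURCE B (Python) =====
-- def _find_exact_symbol(search_payload, asset):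
--     asset_upper = asset.upper()
--     want_name = len(asset_upper) >= 3
--     name_hit = None
--     for coin in (search_payload.get("coins") or []):
--         if str(coin.get("symbol") or "").upper() == asset_upper:
--             return coin
--         if name_hit is None and want_name and str(coin.get("name") or "").upper() == asset_upper:
--             name_hit = coin
--     return name_hit
-- ===== Notes on version B (the rewrite author's own statement) =====
-- stated objective: alternative
-- what changed: Fuses A's two priority-ordered scans over the coin list into a single pass that returns on a symbol match and keeps the first name match in a fallback accumulator.
import Mathlib
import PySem

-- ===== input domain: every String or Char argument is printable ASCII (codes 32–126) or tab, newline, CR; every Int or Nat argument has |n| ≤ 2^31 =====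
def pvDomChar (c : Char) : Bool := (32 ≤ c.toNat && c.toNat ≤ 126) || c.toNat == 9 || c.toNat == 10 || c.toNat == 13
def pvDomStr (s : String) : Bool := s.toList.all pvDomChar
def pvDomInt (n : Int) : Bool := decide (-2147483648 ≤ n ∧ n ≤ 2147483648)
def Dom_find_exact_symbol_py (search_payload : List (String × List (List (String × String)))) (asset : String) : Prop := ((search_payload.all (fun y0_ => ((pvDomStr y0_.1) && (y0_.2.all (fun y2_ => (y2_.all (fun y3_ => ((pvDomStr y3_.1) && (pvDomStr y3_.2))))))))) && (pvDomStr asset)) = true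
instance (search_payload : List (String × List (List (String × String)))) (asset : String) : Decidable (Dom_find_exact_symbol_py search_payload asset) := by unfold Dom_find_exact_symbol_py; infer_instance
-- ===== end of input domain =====

-- ===== PORT A =====
-- B fuses A's two scans into a single pass with a fallback accumulator; proved equal on Dom (objective: alternative).
def find_exact_symbol_py (search_payload : List (String × List (List (String × String)))) (asset : String) : Option (List (String × String)) :=
  let coins := (PySem.Dict.mk search_payload).getD "coins" []
  let asset_upper := PySem.Str.upper asset
  match coins.find? (fun coin => PySem.Str.upper ((PySem.Dict.mk coin).getD "symbol" "") == asset_upper) with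
  | some coin => some coin
  | none =>
    if 3 ≤ PySem.Str.len asset_upper then
      match coins.find? (fun coin => PySem.Str.upper ((PySem.Dict.mk coin).getD "name" "") == asset_upper) with
      | some coin => some coin
      | none => none
    else none

-- ===== PORT B =====
def fesAltLoop (asset_upper : String) (want_name : Bool)
    (coins : List (List (String × String))) (name_hit : Option (List (String × String))) :
    Option (List (String × String)) :=
  match coins with
  | [] => name_hit
  | coin :: rest =>
    if PySem.Str.upper ((PySem.Dict.mk coin).getD "symbol" "") == asset_upper then some coin
    else
      fesAltLoop asset_upper want_name rest
        (if name_hit.isNone && want_name &&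
            (PySem.Str.upper ((PySem.Dict.mk coin).getD "name" "") == asset_upper)
         then some coin else name_hit)

def find_exact_symbol_py_alt (search_payload : List (String × List (List (String × String)))) (asset : String) : Option (List (String × String)) :=
  let asset_upper := PySem.Str.upper asset
  let want_name := decide (3 ≤ PySem.Str.len asset_upper)
  fesAltLoop asset_upper want_name ((PySem.Dict.mk search_payload).getD "coins" []) none

-- ===== PRECONDITION & SPEC =====
def Spec_find_exact_symbol_py (search_payload : List (String × List (List (String × String)))) (asset : String) (out : Option (List (String × String))) : Prop := out = find_exact_symbol_py_alt search_payload asset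
instance (search_payload : List (String × List (List (String × String)))) (asset : String) (out : Option (List (String × String))) : Decidable (Spec_find_exact_symbol_py search_payload asset out) := by unfold Spec_find_exact_symbol_py; infer_instance

-- ===== CLAIM (what is proved, stated in full; the proofs are below) =====
def Claim_equal_find_exact_symbol_py : Prop := ∀ (search_payload : List (String × List (List (String × String)))) (asset : String), Dom_find_exact_symbol_py search_payload asset → Spec_find_exact_symbol_py search_payload asset (find_exact_symbol_py search_payload asset)

-- ===== LEMMAS AND PROOFS =====
-- Invariant of B's fused loop: it is A's symbol scan, with the name scan (guarded by want_name)
-- folded behind the accumulator.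
theorem fesAltLoop_eq (au : String) (w : Bool) (coins : List (List (String × String)))
    (acc : Option (List (String × String))) :
    fesAltLoop au w coins acc =
      ((coins.find? (fun coin => PySem.Str.upper ((PySem.Dict.mk coin).getD "symbol" "") == au)).or
        (if w then acc.or (coins.find? (fun coin => PySem.Str.upper ((PySem.Dict.mk coin).getD "name" "") == au)) else acc)) := by
  induction coins generalizing acc with
  | nil => cases w <;> cases acc <;> simp [fesAltLoop]
  | cons coin rest ih =>
    by_cases hs : (PySem.Str.upper ((PySem.Dict.mk coin).getD "symbol" "") == au) = true
    · simp [fesAltLoop, hs]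
    · rw [fesAltLoop, if_neg hs, ih]
      cases w <;> cases acc <;>
        by_cases hn : (PySem.Str.upper ((PySem.Dict.mk coin).getD "name" "") == au) = true <;>
        simp [List.find?, hs, hn]

-- ===== VERDICT (by name: the statement is the Claim_ definition above) =====
theorem find_exact_symbol_py_spec : Claim_equal_find_exact_symbol_py := by
  intro sp asset _
  unfold Spec_find_exact_symbol_py find_exact_symbol_py find_exact_symbol_py_alt
  rw [fesAltLoop_eq]
  set coins := (PySem.Dict.mk sp).getD "coins" []
  set au := PySem.Str.upper asset
  cases hfs : coins.find? (fun coin => PySem.Str.upper ((PySem.Dict.mk coin).getD "symbol" "") == au) with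
  | some c => simp [hfs]
  | none =>
    cases hfn : coins.find? (fun coin => PySem.Str.upper ((PySem.Dict.mk coin).getD "name" "") == au) <;>
      simp [hfs, hfn]
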